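-- pv_equiv track=rewrite | github.com/hongbozheng/artificial-intelligence | hmm_pos_tagging/viterbi_3.py | getEmissionCount
-- ===== SOURCE A (Python) =====
-- def getEmissionCount(train):
--     WORD = set()
--     word_count = {}
--     word_tag = {}
--     tag_emis_count = {}
--
--     for sentence in train:
--         for word, tag in sentence:
--             if tag not in tag_emis_count:
--                 tag_emis_count[tag] = {}
--             if word in tag_emis_count[tag]:
--                 tag_emis_count[tag][word] += 1
--             else:
--                 tag_emis_count[tag][word] = 1
--             if word in word_count:
--                 word_count[word] += 1
--             else:
--                 word_count[word] = 1
--             if word not in WORD: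
--                 WORD.add(word)
--             word_tag[word] = tag
--     WORD.add('UNK')
--
--     return WORD, word_count, word_tag, tag_emis_count
-- ===== SOURCE B (Python) =====
-- def _count(items):
--     d = {}
--     for x in items:
--         d[x] = d.get(x, 0) + 1
--     return d
--
--
-- def getEmissionCount(train):
--     pairs = [p for sentence in train for p in sentence]
--     words = [w for w, _ in pairs]
--     word_count = _count(words)
--     word_tag = {w: t for w, t in pairs}
--     tags = dict.fromkeys(t for _, t in pairs)
--     tag_emis_count = {t: _count(w for w, t2 in pairs if t2 == t) for t in tags}
--     WORD = set(words) | {'UNK'}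
--     return WORD, word_count, word_tag, tag_emis_count
-- ===== Notes on version B (the rewrite author's own statement) =====
-- stated objective: simpler
-- what changed: A's single fused loop that updates WORD, word_count, word_tag and tag_emis_count simultaneously per token is replaced by flattening the corpus once and building each of the four structures in its own separate pass (counting pass, dict comprehension for last-tag-wins, per-tag grouped counts over the deduplicated tag list, set of words).
import Mathlib
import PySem

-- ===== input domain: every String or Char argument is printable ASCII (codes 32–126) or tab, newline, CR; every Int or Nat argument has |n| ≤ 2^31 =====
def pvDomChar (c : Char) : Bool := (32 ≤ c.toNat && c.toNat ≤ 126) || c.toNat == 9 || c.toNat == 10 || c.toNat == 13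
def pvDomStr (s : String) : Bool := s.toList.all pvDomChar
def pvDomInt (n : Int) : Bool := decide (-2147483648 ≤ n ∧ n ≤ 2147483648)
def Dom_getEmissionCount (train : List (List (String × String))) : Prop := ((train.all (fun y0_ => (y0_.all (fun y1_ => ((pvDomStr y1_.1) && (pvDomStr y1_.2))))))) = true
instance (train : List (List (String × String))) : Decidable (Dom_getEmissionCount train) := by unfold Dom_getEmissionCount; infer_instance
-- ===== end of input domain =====

-- B replaces A's single fused loop updating four structures at once by: flatten once, then build
-- each of the four structures in its own separate pass over the flattened (word, tag) list (objective: simpler).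

-- ===== PORT A =====
-- loop body of A's fused 'for word, tag in sentence' loop; state = (WORD, word_count, word_tag, tag_emis_count)
def aStep (st : PySem.Set String × PySem.Dict String Int × PySem.Dict String String × PySem.Dict String (PySem.Dict String Int))
    (p : String × String) :
    PySem.Set String × PySem.Dict String Int × PySem.Dict String String × PySem.Dict String (PySem.Dict String Int) :=
  let word := p.1
  let tag := p.2
  -- if tag not in tag_emis_count: tag_emis_count[tag] = {}
  let tec := if st.2.2.2.contains tag then st.2.2.2 else st.2.2.2.insert tag PySem.Dict.empty
  -- tag_emis_count[tag][word] += 1  /  = 1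
  let inner := tec.getD tag PySem.Dict.empty
  let tec := tec.insert tag (if inner.contains word then inner.insert word (inner.getD word 0 + 1) else inner.insert word 1)
  -- word_count[word] += 1  /  = 1
  let wc := if st.2.1.contains word then st.2.1.insert word (st.2.1.getD word 0 + 1) else st.2.1.insert word 1
  -- if word not in WORD: WORD.add(word)
  let W := if PySem.Set.contains st.1 word then st.1 else PySem.Set.add st.1 word
  -- word_tag[word] = tag
  let wt := st.2.2.1.insert word tag
  (W, wc, wt, tec)

def getEmissionCount (train : List (List (String × String))) :
    List String × (List (String × Int)) × (List (String × String)) × (List (String × List (String × Int))) :=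
  let st := train.foldl (fun acc sentence => sentence.foldl aStep acc)
    (([] : PySem.Set String), PySem.Dict.empty, PySem.Dict.empty, PySem.Dict.empty)
  (PySem.Set.add st.1 "UNK", st.2.1.items, st.2.2.1.items, st.2.2.2.items.map (fun q => (q.1, q.2.items)))

-- ===== PORT B =====
-- Source B's _count helper: d[x] = d.get(x, 0) + 1 over the iterable
def countAlt (xs : List String) : PySem.Dict String Int :=
  xs.foldl (fun d x => d.insert x (d.getD x 0 + 1)) PySem.Dict.empty

def getEmissionCount_alt (train : List (List (String × String))) :
    List String × (List (String × Int)) × (List (String × String)) × (List (String × List (String × Int))) :=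
  let pairs := train.flatten
  let words := pairs.map (fun p => p.1)
  let wordCount := countAlt words
  let wordTag := pairs.foldl (fun d p => d.insert p.1 p.2) PySem.Dict.empty
  let tags := PySem.List.dedup (pairs.map (fun p => p.2))
  let tagEmis := tags.map (fun t => (t, (countAlt ((pairs.filter (fun p => p.2 == t)).map (fun p => p.1))).items))
  (PySem.Set.add (PySem.Set.ofList words) "UNK", wordCount.items, wordTag.items, tagEmis)

-- ===== PRECONDITION & SPEC =====
def Spec_getEmissionCount (train : List (List (String × String))) (out : List String × (List (String × Int)) × (List (String × String)) × (List (String × List (String × Int)))) : Prop := out = getEmissionCount_alt train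
instance (train : List (List (String × String))) (out : List String × (List (String × Int)) × (List (String × String)) × (List (String × List (String × Int)))) : Decidable (Spec_getEmissionCount train out) := by
  unfold Spec_getEmissionCount
  exact @instDecidableEqProd _ _ _ (@instDecidableEqProd _ _ _ (@instDecidableEqProd _ _ _ _)) out (getEmissionCount_alt train)

-- ===== CLAIM (what is proved, stated in full; the proofs are below) =====
def Claim_equal_getEmissionCount : Prop := ∀ (train : List (List (String × String))), Dom_getEmissionCount train → Spec_getEmissionCount train (getEmissionCount train)

-- ===== LEMMAS AND PROOFS =====

-- the four independent per-accumulator updates making up aStep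
def fW (s : PySem.Set String) (p : String × String) : PySem.Set String :=
  if PySem.Set.contains s p.1 then s else PySem.Set.add s p.1
def fC (d : PySem.Dict String Int) (p : String × String) : PySem.Dict String Int :=
  if d.contains p.1 then d.insert p.1 (d.getD p.1 0 + 1) else d.insert p.1 1
def fT (d : PySem.Dict String String) (p : String × String) : PySem.Dict String String :=
  d.insert p.1 p.2
def fEins (d0 : PySem.Dict String (PySem.Dict String Int)) (p : String × String) : PySem.Dict String (PySem.Dict String Int) :=
  d0.insert p.2 (if (d0.getD p.2 PySem.Dict.empty).contains p.1
    then (d0.getD p.2 PySem.Dict.empty).insert p.1 ((d0.getD p.2 PySem.Dict.empty).getD p.1 0 + 1)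
    else (d0.getD p.2 PySem.Dict.empty).insert p.1 1)
def fE (d : PySem.Dict String (PySem.Dict String Int)) (p : String × String) : PySem.Dict String (PySem.Dict String Int) :=
  fEins (if d.contains p.2 then d else d.insert p.2 PySem.Dict.empty) p

lemma aStep_eq : aStep = fun st p => (fW st.1 p, fC st.2.1 p, fT st.2.2.1 p, fE st.2.2.2 p) := rfl

lemma fold_split (l : List (String × String))
    (a : PySem.Set String) (b : PySem.Dict String Int) (c : PySem.Dict String String)
    (d : PySem.Dict String (PySem.Dict String Int)) :
    l.foldl aStep (a, b, c, d) = (l.foldl fW a, l.foldl fC b, l.foldl fT c, l.foldl fE d) := by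
  rw [aStep_eq]
  rw [PySem.List.foldl_prod_mk (f := fW) (g := fun s e => (fC s.1 e, fT s.2.1 e, fE s.2.2 e))]
  rw [PySem.List.foldl_prod_mk (f := fC) (g := fun s e => (fT s.1 e, fE s.2 e))]
  rw [PySem.List.foldl_prod_mk (f := fT) (g := fE)]

lemma fW_eq (s : PySem.Set String) (p : String × String) : fW s p = PySem.Set.add s p.1 := by
  unfold fW PySem.Set.add
  split <;> simp_all

lemma foldW (l : List (String × String)) :
    l.foldl fW [] = PySem.Set.ofList (l.map (fun p => p.1)) := by
  rw [PySem.Set.ofList_eq_foldl, List.foldl_map]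
  exact PySem.List.foldl_congr_mem _ _ _ _ (fun acc x _ => fW_eq acc x)

lemma fC_eq (d : PySem.Dict String Int) (p : String × String) :
    fC d p = d.insert p.1 (d.getD p.1 0 + 1) := by
  unfold fC
  by_cases h : d.contains p.1
  · rw [if_pos h]
  · rw [if_neg h, PySem.Dict.getD_of_not_contains _ _ (by simpa using h)]
    norm_num

lemma foldC (l : List (String × String)) :
    l.foldl fC PySem.Dict.empty = countAlt (l.map (fun p => p.1)) := by
  unfold countAlt
  rw [List.foldl_map]
  exact PySem.List.foldl_congr_mem _ _ _ _ (fun acc x _ => fC_eq acc x)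

-- grouping fold: the tag_emis_count loop as a single modify per pair
def gStep (d : PySem.Dict String (PySem.Dict String Int)) (p : String × String) :
    PySem.Dict String (PySem.Dict String Int) :=
  d.modify p.2 PySem.Dict.empty (fun m => m.modify p.1 0 (· + 1))

lemma fE_eq (d : PySem.Dict String (PySem.Dict String Int)) (p : String × String) :
    fE d p = gStep d p := by
  unfold fE fEins gStep
  by_cases hc : d.contains p.2
  · rw [if_pos hc]
    show d.insert p.2 _ = d.insert p.2 ((d.getD p.2 PySem.Dict.empty).modify p.1 0 (· + 1))
    congr 1
    by_cases hm : (d.getD p.2 PySem.Dict.empty).contains p.1 = true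
    · rw [if_pos hm]; rfl
    · rw [if_neg hm]
      show _ = (d.getD p.2 PySem.Dict.empty).insert p.1 ((d.getD p.2 PySem.Dict.empty).getD p.1 0 + 1)
      rw [PySem.Dict.getD_of_not_contains (d.getD p.2 PySem.Dict.empty) 0 (by simpa using hm)]
      norm_num
  · rw [if_neg hc]
    rw [PySem.Dict.getD_insert_self, PySem.Dict.insert_insert_self]
    rw [if_neg (by simp [PySem.Dict.contains_empty])]
    show _ = d.insert p.2 ((d.getD p.2 PySem.Dict.empty).modify p.1 0 (· + 1))
    rw [PySem.Dict.getD_of_not_contains d PySem.Dict.empty (by simpa using hc)]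
    congr 1

def G (l : List (String × String)) : PySem.Dict String (PySem.Dict String Int) :=
  l.foldl gStep PySem.Dict.empty

lemma foldE (l : List (String × String)) :
    l.foldl fE PySem.Dict.empty = G l :=
  PySem.List.foldl_congr_mem _ _ _ _ (fun acc x _ => fE_eq acc x)

lemma dedup_eq_ofList (xs : List String) : PySem.List.dedup xs = PySem.Set.ofList xs := rfl

lemma dedup_snoc (xs : List String) (x : String) :
    PySem.List.dedup (xs ++ [x]) =
      if x ∈ xs then PySem.List.dedup xs else PySem.List.dedup xs ++ [x] := by
  rw [dedup_eq_ofList, dedup_eq_ofList, PySem.Set.ofList_eq_foldl, List.foldl_append]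
  show PySem.Set.add _ x = _
  rw [← PySem.Set.ofList_eq_foldl]
  unfold PySem.Set.add
  by_cases h : x ∈ xs
  · rw [if_pos (by simp [PySem.Set.contains, PySem.Set.mem_ofList, h]), if_pos h]
  · rw [if_neg (by simp [PySem.Set.contains, PySem.Set.mem_ofList, h]), if_neg h]

lemma G_keys (l : List (String × String)) :
    (G l).keys = PySem.List.dedup (l.map (fun p => p.2)) := by
  unfold G gStep
  rw [PySem.Dict.keys_foldl_modify_key l (fun p => p.2) PySem.Dict.empty
        (fun _ p => fun m => m.modify p.1 0 (· + 1)) PySem.Dict.empty]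
  rw [dedup_eq_ofList, PySem.Set.ofList_eq_foldl]
  rfl

lemma G_nodup (l : List (String × String)) : (G l).keys.Nodup := by
  unfold G gStep
  exact PySem.Dict.nodup_keys_foldl_modify_key l (fun p => p.2) PySem.Dict.empty
    (fun _ p => fun m => m.modify p.1 0 (· + 1)) PySem.Dict.empty (by simp)

lemma G_contains (l : List (String × String)) (t : String) :
    (G l).contains t = true ↔ t ∈ l.map (fun p => p.2) := by
  rw [PySem.Dict.contains_iff_mem_keys, G_keys, dedup_eq_ofList, PySem.Set.mem_ofList]

lemma G_items (l : List (String × String)) :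
    (G l).items = (PySem.List.dedup (l.map (fun p => p.2))).map
      (fun t => (t, PySem.Dict.counter ((l.filter (fun p => p.2 == t)).map (fun p => p.1)))) := by
  induction l using List.reverseRecOn with
  | nil => rfl
  | append_singleton l p ih =>
    have hstep : G (l ++ [p]) = gStep (G l) p := by
      unfold G; rw [List.foldl_append]; rfl
    have hm2 : (l ++ [p]).map (fun q => q.2) = l.map (fun q => q.2) ++ [p.2] := by simp
    rw [hstep, hm2, dedup_snoc]
    by_cases hmem : p.2 ∈ l.map (fun q => q.2)
    · -- tag already present: modify replaces the entry in place
      rw [if_pos hmem]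
      have hc : (G l).contains p.2 = true := (G_contains l p.2).mpr hmem
      have hentry : (p.2, PySem.Dict.counter ((l.filter (fun q => q.2 == p.2)).map (fun q => q.1))) ∈ (G l).items := by
        rw [ih]
        exact List.mem_map_of_mem (by rw [dedup_eq_ofList, PySem.Set.mem_ofList]; exact hmem)
      have hgetD : (G l).getD p.2 PySem.Dict.empty
          = PySem.Dict.counter ((l.filter (fun q => q.2 == p.2)).map (fun q => q.1)) :=
        PySem.Dict.getD_of_mem_items _ hentry (G_nodup l) _
      show ((G l).insert p.2 _).items = _
      rw [PySem.Dict.items_insert_of_contains _ _ hc, ih, List.map_map]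
      apply List.map_congr_left
      intro t ht
      simp only [Function.comp]
      by_cases hteq : t = p.2
      · rw [hteq, if_pos (by simp)]
        have hfp : List.filter (fun q => q.2 == p.2) (l ++ [p]) = List.filter (fun q => q.2 == p.2) l ++ [p] := by
          rw [List.filter_append, List.filter_singleton]; simp
        rw [hfp, List.map_append]
        simp only [List.map_cons, List.map_nil]
        rw [PySem.Dict.counter_append_singleton, hgetD]
      · have hne : (p.2 == t) = false := beq_eq_false_iff_ne.mpr (fun h => hteq h.symm)
        have hf1 : List.filter (fun q => q.2 == t) [p] = [] := by
          simp [hne]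
        rw [if_neg (by simp [hteq]), List.filter_append, hf1, List.append_nil]
    · -- fresh tag: modify appends a new singleton entry
      rw [if_neg hmem]
      have hc : (G l).contains p.2 = false := by
        cases h : (G l).contains p.2
        · rfl
        · exact absurd ((G_contains l p.2).mp h) hmem
      show ((G l).insert p.2 ((fun m => m.modify p.1 0 (· + 1)) ((G l).getD p.2 PySem.Dict.empty))).items = _
      rw [PySem.Dict.getD_of_not_contains _ _ hc, PySem.Dict.items_insert_of_not_contains _ _ hc,
          ih, List.map_append]
      congr 1
      · apply List.map_congr_left
        intro t ht
        have htmem : t ∈ l.map (fun q => q.2) := by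
          rw [dedup_eq_ofList, PySem.Set.mem_ofList] at ht; exact ht
        have hne : (p.2 == t) = false :=
          beq_eq_false_iff_ne.mpr (fun h => hmem (h ▸ htmem))
        have hf1 : List.filter (fun q => q.2 == t) [p] = [] := by
          simp [hne]
        rw [List.filter_append, hf1, List.append_nil]
      · have hfl : l.filter (fun q => q.2 == p.2) = [] := by
          rw [List.filter_eq_nil_iff]
          intro q hq h
          apply hmem
          have h2 : q.2 = p.2 := by simpa using h
          exact h2 ▸ List.mem_map_of_mem hq
        have hf1 : List.filter (fun q => q.2 == p.2) [p] = [p] := by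
          simp
        simp only [List.map_cons, List.map_nil]
        rw [List.filter_append, hfl, hf1, List.nil_append]
        rfl

lemma countAlt_eq_counter (xs : List String) : countAlt xs = PySem.Dict.counter xs :=
  PySem.Dict.foldl_insert_getD_add_one_eq_counter xs

-- ===== VERDICT (by name: the statement is the Claim_ definition above) =====
theorem getEmissionCount_spec : Claim_equal_getEmissionCount := by
  intro train _
  show getEmissionCount train = getEmissionCount_alt train
  simp only [getEmissionCount, getEmissionCount_alt]
  rw [← List.foldl_flatten, fold_split]
  rw [foldW, foldC, foldE]
  refine congrArg₂ Prod.mk rfl (congrArg₂ Prod.mk ?_ (congrArg₂ Prod.mk rfl ?_))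
  · rw [countAlt_eq_counter]
  · rw [G_items, List.map_map]
    apply List.map_congr_left
    intro t _
    simp only [Function.comp]
    rw [countAlt_eq_counter]
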